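-- pv_equiv track=rewrite | github.com/betzburger/eibi_tuner | eibi_tuner.py | _is_day_valid
-- ===== SOURCE A (Python) =====
-- def _is_day_valid(days_str, current_utc_weekday):
--     if not days_str:
--         return True # Empty days string means all days
--
--     day_map = {
--         "Mo": 0, "Tu": 1, "We": 2, "Th": 3, "Fr": 4, "Sa": 5, "Su": 6,
--         "1": 0, "2": 1, "3": 2, "4": 3, "5": 4, "6": 5, "7": 6
--     }
--
--     valid_weekdays = set()
--
--     # Handle ranges like We-Mo or 1-7
--     if '-' in days_str:
--         start_day_str, end_day_str = days_str.split('-')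
--         start_day_int = day_map.get(start_day_str)
--         end_day_int = day_map.get(end_day_str)
--
--         if start_day_int is not None and end_day_int is not None:
--             if start_day_int <= end_day_int:
--                 for i in range(start_day_int, end_day_int + 1):
--                     valid_weekdays.add(i)
--             else: # Overnight range, e.g., Friday to Monday
--                 for i in range(start_day_int, 7):
--                     valid_weekdays.add(i)
--                 for i in range(0, end_day_int + 1):
--                     valid_weekdays.add(i)
--     else: # Handles single day abbreviations, or sequences like '1234567' or '.2.4.6.'
--         found_digit_day = False
--         for char in days_str:
--             if char.isdigit():
--                 day_int = day_map.get(char)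
--                 if day_int is not None:
--                     valid_weekdays.add(day_int)
--                     found_digit_day = True
--
--         # If no digit days were found, try to parse the whole string as an abbreviation
--         if not found_digit_day:
--             day_int = day_map.get(days_str.strip())
--             if day_int is not None:
--                 valid_weekdays.add(day_int)
--
--     return current_utc_weekday in valid_weekdays
-- ===== SOURCE B (Python) =====
-- _NAMES = "MoTuWeThFrSaSu"
--
--
-- def _day_num(tok):
--     # inverse lookup: generate each day's two spellings and compare with the token
--     for d in range(7):
--         if tok == _NAMES[2 * d:2 * d + 2] or tok == chr(d + 49):
--             return d
--     return None
--
--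
-- def _is_day_valid(days_str, current_utc_weekday):
--     if not days_str:
--         return True  # Empty days string means all days
--
--     w = current_utc_weekday
--
--     if '-' in days_str:
--         lo, hi = days_str.split('-')
--         a, b = _day_num(lo), _day_num(hi)
--         if a is None or b is None:
--             return False
--         # one modular formula covers plain and overnight ranges alike
--         return 0 <= w <= 6 and (w - a) % 7 <= (b - a) % 7
--
--     if any('1' <= c <= '7' for c in days_str):
--         # a digit list selects w iff it contains w's digit spelling
--         return 0 <= w <= 6 and chr(w + 49) in days_str
--
--     return _day_num(days_str.strip()) == w
-- ===== Notes on version B (the rewrite author's own statement) =====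
-- stated objective: alternative
-- what changed: B never builds a set of valid weekdays: the range branch is decided by one modular rotation-distance formula (w-a)%7 <= (b-a)%7 that covers plain and overnight ranges without a case split or loops, the digit branch tests whether the spec contains the weekday's own digit character chr(w+49), and token lookup is a generate-and-test loop comparing each day's two generated spellings with the token instead of a dict.
import Mathlib
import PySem

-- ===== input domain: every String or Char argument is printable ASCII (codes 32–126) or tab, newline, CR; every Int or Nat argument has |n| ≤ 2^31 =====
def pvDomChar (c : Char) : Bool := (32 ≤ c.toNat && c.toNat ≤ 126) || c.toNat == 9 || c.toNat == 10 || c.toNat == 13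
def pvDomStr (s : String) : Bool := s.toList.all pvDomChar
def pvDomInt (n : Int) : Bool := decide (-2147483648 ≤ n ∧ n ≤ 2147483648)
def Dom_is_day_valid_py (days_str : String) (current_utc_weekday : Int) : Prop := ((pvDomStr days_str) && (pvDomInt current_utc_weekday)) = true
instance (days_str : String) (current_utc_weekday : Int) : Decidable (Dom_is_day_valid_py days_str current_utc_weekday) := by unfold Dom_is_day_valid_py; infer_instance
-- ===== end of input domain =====

-- B builds no set of valid weekdays: one modular rotation-distance formula decides ranges,
-- a single character-containment test decides digit lists, and token lookup is
-- generate-and-test over the seven days instead of a dict; same return value, proved below.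

-- the literal day_map of the Python source (A-side copy)
def pvDayMap : PySem.Dict String Int :=
  PySem.Dict.ofList [("Mo", 0), ("Tu", 1), ("We", 2), ("Th", 3), ("Fr", 4), ("Sa", 5), ("Su", 6),
                     ("1", 0), ("2", 1), ("3", 2), ("4", 3), ("5", 4), ("6", 5), ("7", 6)]

-- ===== PORT A =====
-- one step of A's `for char in days_str` loop (state: the set built so far, found_digit_day)
def pvDigitStep (acc : PySem.Set Int × Bool) (c : Char) : PySem.Set Int × Bool :=
  if PySem.Chars.isdigit c then
    match pvDayMap.get? (String.ofList [c]) with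
    | some d => (PySem.Set.add acc.1 d, true)
    | none => acc
  else acc

def is_day_valid_py (days_str : String) (current_utc_weekday : Int) : Bool :=
  if days_str.toList = [] then true
  else
    let valid_weekdays : PySem.Set Int :=
      if PySem.Str.isIn "-" days_str then
        match PySem.Str.split? days_str "-" with
        | some [start_day_str, end_day_str] =>
          match pvDayMap.get? start_day_str, pvDayMap.get? end_day_str with
          | some s, some e =>
            if s ≤ e then
              (PySem.List.pyRange s (e + 1) 1).foldl PySem.Set.add PySem.Set.empty
            else
              (PySem.List.pyRange 0 (e + 1) 1).foldl PySem.Set.add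
                ((PySem.List.pyRange s 7 1).foldl PySem.Set.add PySem.Set.empty)
          | _, _ => PySem.Set.empty
        | _ => PySem.Set.empty  -- Python raises ValueError here (≥ 2 dashes); excluded by Pre_
      else
        let st := days_str.toList.foldl pvDigitStep (PySem.Set.empty, false)
        if st.2 then st.1
        else
          match pvDayMap.get? (PySem.Str.strip days_str) with
          | some d => PySem.Set.add st.1 d
          | none => st.1
    PySem.Set.contains valid_weekdays current_utc_weekday

-- ===== PORT B =====
def pvNamesStr : String := "MoTuWeThFrSaSu"

-- _NAMES[2*d:2*d+2]
def pvNameTok (d : Int) : String :=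
  String.ofList (PySem.List.slice pvNamesStr.toList (some (2 * d)) (some (2 * d + 2)))

-- chr(d + 49); exact for the 0 ≤ d ≤ 6 produced by range(7) (ASCII code point)
def pvChrTok (d : Int) : String := String.ofList [Char.ofNat (d + 49).toNat]

-- B's _day_num: `for d in range(7): if tok == _NAMES[2d:2d+2] or tok == chr(d+49): return d`
def pvDayNumB (tok : String) : Option Int :=
  (PySem.List.pyRange 0 7 1).findSome? (fun d =>
    if tok == pvNameTok d || tok == pvChrTok d then some d else none)

def is_day_valid_py_alt (days_str : String) (current_utc_weekday : Int) : Bool :=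
  if days_str.toList = [] then true
  else
    let w := current_utc_weekday
    if PySem.Str.isIn "-" days_str then
      let parts := (PySem.Str.split? days_str "-").getD []
      if parts.length = 2 then
        let a? := pvDayNumB (parts.getD 0 "")
        let b? := pvDayNumB (parts.getD 1 "")
        if a?.isNone || b?.isNone then false
        else
          let a := a?.getD 0
          let b := b?.getD 0
          -- 0 <= w <= 6 and (w - a) % 7 <= (b - a) % 7
          decide (0 ≤ w ∧ w ≤ 6) && decide (PySem.Int.mod (w - a) 7 ≤ PySem.Int.mod (b - a) 7)
      else false  -- Python raises ValueError here (≥ 2 dashes); excluded by Pre_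
    else if days_str.toList.any (fun c => decide ('1' ≤ c) && decide (c ≤ '7')) then
      -- chr(w + 49) evaluated only under the guard in Python; harmless total term here
      decide (0 ≤ w ∧ w ≤ 6) && PySem.Str.isIn (String.ofList [Char.ofNat (w + 49).toNat]) days_str
    else pvDayNumB (PySem.Str.strip days_str) == some w

-- ===== PRECONDITION & SPEC =====
-- Pre_ excludes strings containing two or more '-' characters: there days_str.split('-')
-- yields more than two pieces and BOTH Pythons raise ValueError on tuple unpacking.
def Pre_is_day_valid_py (days_str : String) (current_utc_weekday : Int) : Prop :=
  PySem.Str.count days_str "-" ≤ 1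
instance (days_str : String) (current_utc_weekday : Int) : Decidable (Pre_is_day_valid_py days_str current_utc_weekday) := by unfold Pre_is_day_valid_py; infer_instance

def pvWitness_is_day_valid_py : String × Int := ("Fr-Mo", 6)

def Spec_is_day_valid_py (days_str : String) (current_utc_weekday : Int) (out : Bool) : Prop := out = is_day_valid_py_alt days_str current_utc_weekday
instance (days_str : String) (current_utc_weekday : Int) (out : Bool) : Decidable (Spec_is_day_valid_py days_str current_utc_weekday out) := by unfold Spec_is_day_valid_py; infer_instance

-- ===== CLAIM (what is proved, stated in full; the proofs are below) =====
def Claim_equal_is_day_valid_py : Prop := ∀ (days_str : String) (current_utc_weekday : Int), Dom_is_day_valid_py days_str current_utc_weekday → Pre_is_day_valid_py days_str current_utc_weekday → Spec_is_day_valid_py days_str current_utc_weekday (is_day_valid_py days_str current_utc_weekday)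

-- ===== LEMMAS AND PROOFS =====

def pvSeven : List Char := ['1', '2', '3', '4', '5', '6', '7']

theorem pvDayMapMk : pvDayMap = PySem.Dict.mk [("Mo", 0), ("Tu", 1), ("We", 2), ("Th", 3),
    ("Fr", 4), ("Sa", 5), ("Su", 6), ("1", 0), ("2", 1), ("3", 2), ("4", 3), ("5", 4),
    ("6", 5), ("7", 6)] := rfl

theorem pvDictNilGet (x : String) :
    (PySem.Dict.mk ([] : List (String × Int))).get? x = none := rfl

theorem pvGetCharSeven (c : Char) (hc : c ∈ pvSeven) :
    pvDayMap.get? (String.ofList [c]) = some ((c.toNat : Int) - 49) ∧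
      PySem.Chars.isdigit c = true := by
  fin_cases hc <;> exact ⟨by decide, by decide⟩

theorem pvBeqOfList2 (k : String) (c a b : Char) (hk : k.toList = [a, b]) :
    (k == String.ofList [c]) = false := by
  apply beq_eq_false_iff_ne.mpr
  intro he
  have ht := congrArg String.toList he
  rw [hk, String.toList_ofList] at ht
  exact absurd (congrArg List.length ht) (by simp)

theorem pvBeqOfList1 (k : String) (c a : Char) (hk : k.toList = [a]) (hne : c ≠ a) :
    (k == String.ofList [c]) = false := by
  apply beq_eq_false_iff_ne.mpr
  intro he
  have ht := congrArg String.toList he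
  rw [hk, String.toList_ofList] at ht
  injection ht with h1 h2
  exact hne h1.symm

theorem pvGetCharNone (c : Char) (hc : c ∉ pvSeven) :
    pvDayMap.get? (String.ofList [c]) = none := by
  simp only [pvSeven, List.mem_cons, List.not_mem_nil, or_false, not_or] at hc
  obtain ⟨n1, n2, n3, n4, n5, n6, n7⟩ := hc
  rw [pvDayMapMk]
  simp only [PySem.Dict.get?_mk_cons]
  rw [pvBeqOfList2 "Mo" c 'M' 'o' (by decide), pvBeqOfList2 "Tu" c 'T' 'u' (by decide),
      pvBeqOfList2 "We" c 'W' 'e' (by decide), pvBeqOfList2 "Th" c 'T' 'h' (by decide),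
      pvBeqOfList2 "Fr" c 'F' 'r' (by decide), pvBeqOfList2 "Sa" c 'S' 'a' (by decide),
      pvBeqOfList2 "Su" c 'S' 'u' (by decide),
      pvBeqOfList1 "1" c '1' (by decide) n1, pvBeqOfList1 "2" c '2' (by decide) n2,
      pvBeqOfList1 "3" c '3' (by decide) n3, pvBeqOfList1 "4" c '4' (by decide) n4,
      pvBeqOfList1 "5" c '5' (by decide) n5, pvBeqOfList1 "6" c '6' (by decide) n6,
      pvBeqOfList1 "7" c '7' (by decide) n7]
  simp only [Bool.false_eq_true, if_false]
  exact pvDictNilGet _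

theorem pvBeqNe (k t : String) (h : ¬ t = k) : (k == t) = false :=
  beq_eq_false_iff_ne.mpr (fun he => h he.symm)

theorem pvBeqNe' (t k : String) (h : ¬ t = k) : (t == k) = false :=
  beq_eq_false_iff_ne.mpr h

theorem pvFoldAddMem (l : List Int) (init : PySem.Set Int) (w : Int) :
    w ∈ l.foldl PySem.Set.add init ↔ w ∈ init ∨ w ∈ l := by
  induction l generalizing init with
  | nil => simp
  | cons x xs ih =>
      simp only [List.foldl_cons, ih, PySem.Set.mem_add, List.mem_cons]
      tauto

theorem pvDigitLoop (cs : List Char) (s0 : PySem.Set Int) (b0 : Bool) :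
    (cs.foldl pvDigitStep (s0, b0)).2 = (b0 || cs.any (fun c => pvSeven.contains c)) ∧
    ∀ w : Int, w ∈ (cs.foldl pvDigitStep (s0, b0)).1 ↔
      w ∈ s0 ∨ ∃ c ∈ cs, c ∈ pvSeven ∧ w = (c.toNat : Int) - 49 := by
  induction cs generalizing s0 b0 with
  | nil => simp
  | cons c cs ih =>
      by_cases hc : c ∈ pvSeven
      · obtain ⟨hget, hdig⟩ := pvGetCharSeven c hc
        have hstep : pvDigitStep (s0, b0) c = (PySem.Set.add s0 ((c.toNat : Int) - 49), true) := by
          simp [pvDigitStep, hdig, hget]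
        refine ⟨?_, ?_⟩
        · simp [List.foldl_cons, hstep, (ih _ _).1, List.any_cons, List.contains_eq_mem, hc]
        · intro w
          simp only [List.foldl_cons, hstep, (ih _ _).2, PySem.Set.mem_add, List.mem_cons]
          constructor
          · intro h
            rcases h with (h | h) | h
            · exact Or.inl h
            · exact Or.inr ⟨c, Or.inl rfl, hc, h⟩
            · obtain ⟨d, hd, hds, hdw⟩ := h
              exact Or.inr ⟨d, Or.inr hd, hds, hdw⟩
          · intro h
            rcases h with h | ⟨d, hd | hd, hds, hdw⟩
            · exact Or.inl (Or.inl h)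
            · subst hd; exact Or.inl (Or.inr hdw)
            · exact Or.inr ⟨d, hd, hds, hdw⟩
      · have hget := pvGetCharNone c hc
        have hstep : pvDigitStep (s0, b0) c = (s0, b0) := by
          simp [pvDigitStep, hget]
        refine ⟨?_, ?_⟩
        · simp [List.foldl_cons, hstep, (ih _ _).1, List.any_cons, List.contains_eq_mem, hc]
        · intro w
          simp only [List.foldl_cons, hstep, (ih _ _).2, List.mem_cons]
          constructor
          · intro h
            rcases h with h | ⟨d, hd, hds, hdw⟩
            · exact Or.inl h
            · exact Or.inr ⟨d, Or.inr hd, hds, hdw⟩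
          · intro h
            rcases h with h | ⟨d, hd | hd, hds, hdw⟩
            · exact Or.inl h
            · exact absurd (hd ▸ hds) hc
            · exact Or.inr ⟨d, hd, hds, hdw⟩

theorem pvSingletonInfix (a : Char) (l : List Char) : [a] <:+: l ↔ a ∈ l := by
  constructor
  · intro h; exact h.mem (List.mem_singleton_self a)
  · intro h
    obtain ⟨l1, l2, rfl⟩ := List.append_of_mem h
    exact ⟨l1, l2, by simp⟩

-- B's generate-and-test _day_num computes exactly A's day_map.get on every token
theorem pvGetEq (t : String) : pvDayNumB t = pvDayMap.get? t := by
  by_cases h1 : t = "Mo"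
  · subst h1; decide
  by_cases h2 : t = "Tu"
  · subst h2; decide
  by_cases h3 : t = "We"
  · subst h3; decide
  by_cases h4 : t = "Th"
  · subst h4; decide
  by_cases h5 : t = "Fr"
  · subst h5; decide
  by_cases h6 : t = "Sa"
  · subst h6; decide
  by_cases h7 : t = "Su"
  · subst h7; decide
  by_cases h8 : t = "1"
  · subst h8; decide
  by_cases h9 : t = "2"
  · subst h9; decide
  by_cases h10 : t = "3"
  · subst h10; decide
  by_cases h11 : t = "4"
  · subst h11; decide
  by_cases h12 : t = "5"
  · subst h12; decide
  by_cases h13 : t = "6"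
  · subst h13; decide
  by_cases h14 : t = "7"
  · subst h14; decide
  -- neither side matches: both are none
  have hb : pvDayNumB t = none := by
    rw [pvDayNumB, show PySem.List.pyRange 0 7 1 = [0, 1, 2, 3, 4, 5, 6] from by decide]
    simp only [List.findSome?,
      show pvNameTok 0 = "Mo" from by decide, show pvChrTok 0 = "1" from by decide,
      show pvNameTok 1 = "Tu" from by decide, show pvChrTok 1 = "2" from by decide,
      show pvNameTok 2 = "We" from by decide, show pvChrTok 2 = "3" from by decide,
      show pvNameTok 3 = "Th" from by decide, show pvChrTok 3 = "4" from by decide,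
      show pvNameTok 4 = "Fr" from by decide, show pvChrTok 4 = "5" from by decide,
      show pvNameTok 5 = "Sa" from by decide, show pvChrTok 5 = "6" from by decide,
      show pvNameTok 6 = "Su" from by decide, show pvChrTok 6 = "7" from by decide,
      pvBeqNe' t "Mo" h1, pvBeqNe' t "Tu" h2, pvBeqNe' t "We" h3, pvBeqNe' t "Th" h4,
      pvBeqNe' t "Fr" h5, pvBeqNe' t "Sa" h6, pvBeqNe' t "Su" h7, pvBeqNe' t "1" h8,
      pvBeqNe' t "2" h9, pvBeqNe' t "3" h10, pvBeqNe' t "4" h11, pvBeqNe' t "5" h12,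
      pvBeqNe' t "6" h13, pvBeqNe' t "7" h14, Bool.or_self, Bool.false_eq_true, if_false]
  have ha : pvDayMap.get? t = none := by
    rw [pvDayMapMk]
    simp only [PySem.Dict.get?_mk_cons]
    rw [pvBeqNe "Mo" t h1, pvBeqNe "Tu" t h2, pvBeqNe "We" t h3, pvBeqNe "Th" t h4,
        pvBeqNe "Fr" t h5, pvBeqNe "Sa" t h6, pvBeqNe "Su" t h7, pvBeqNe "1" t h8,
        pvBeqNe "2" t h9, pvBeqNe "3" t h10, pvBeqNe "4" t h11, pvBeqNe "5" t h12,
        pvBeqNe "6" t h13, pvBeqNe "7" t h14]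
    simp only [Bool.false_eq_true, if_false]
    exact pvDictNilGet _
  rw [ha, hb]

-- a successful B-side lookup always yields a day in 0..6
theorem pvDayNumBRange (t : String) (v : Int) (h : pvDayNumB t = some v) :
    0 ≤ v ∧ v ≤ 6 := by
  rw [pvDayNumB] at h
  obtain ⟨d, hd, hf⟩ := List.exists_of_findSome?_eq_some h
  have hmem := (PySem.List.mem_pyRange_one).mp hd
  split at hf
  · cases hf; omega
  · cases hf

set_option maxRecDepth 20000 in
theorem pvCharOfVal (w : Int) (h0 : 0 ≤ w) (h6 : w ≤ 6) :
    ∃ c0 ∈ pvSeven, w = (c0.toNat : Int) - 49 ∧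
      String.ofList [Char.ofNat (w + 49).toNat] = String.ofList [c0] := by
  interval_cases w
  · exact ⟨'1', by decide, by decide, by decide⟩
  · exact ⟨'2', by decide, by decide, by decide⟩
  · exact ⟨'3', by decide, by decide, by decide⟩
  · exact ⟨'4', by decide, by decide, by decide⟩
  · exact ⟨'5', by decide, by decide, by decide⟩
  · exact ⟨'6', by decide, by decide, by decide⟩
  · exact ⟨'7', by decide, by decide, by decide⟩

theorem pvSevenBounds (c : Char) (hc : c ∈ pvSeven) : 49 ≤ c.toNat ∧ c.toNat ≤ 55 := by
  fin_cases hc <;> decide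

theorem pvSevenEqOfVal (c c0 : Char) (hc : c ∈ pvSeven) (hc0 : c0 ∈ pvSeven)
    (h : (c.toNat : Int) - 49 = (c0.toNat : Int) - 49) : c = c0 := by
  fin_cases hc <;> fin_cases hc0 <;> first | rfl | (exact absurd h (by decide))

-- B's chained comparison '1' <= c <= '7' is exactly membership in the seven digit chars
theorem pvDigitCond (c : Char) :
    (decide ('1' ≤ c) && decide (c ≤ '7')) = pvSeven.contains c := by
  by_cases hc : c ∈ pvSeven
  · fin_cases hc <;> decide
  · have hnc : pvSeven.contains c = false := by
      simp [List.contains_eq_mem, hc]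
    rw [hnc]
    by_cases hb : (decide ('1' ≤ c) && decide (c ≤ '7')) = true
    · exfalso
      simp only [Bool.and_eq_true, decide_eq_true_iff, Char.le_def] at hb
      have h1 : 49 ≤ c.toNat := hb.1
      have h2 : c.toNat ≤ 55 := hb.2
      apply hc
      have hcn := Char.ofNat_toNat c
      interval_cases h : c.toNat <;> (rw [← hcn]; decide)
    · exact Bool.eq_false_iff.mpr hb

-- ===== VERDICT (by name: the statement is the Claim_ definition above) =====
theorem is_day_valid_py_spec : Claim_equal_is_day_valid_py := by
  intro ds w hdom hpre
  unfold Spec_is_day_valid_py is_day_valid_py is_day_valid_py_alt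
  by_cases h0 : ds.toList = []
  · simp [h0]
  rw [if_neg h0, if_neg h0]
  cases hdash : PySem.Str.isIn "-" ds with
  | true =>
    simp only [if_true]
    cases hsp : PySem.Str.split? ds "-" with
    | none => simp [PySem.Set.empty]
    | some parts =>
      rcases parts with _ | ⟨a, _ | ⟨b, _ | ⟨c, rest⟩⟩⟩
      · simp [PySem.Set.empty]
      · simp [PySem.Set.empty]
      · dsimp only
        simp only [Option.getD_some, List.getD_cons_zero, List.getD_cons_succ,
                   List.length_cons, List.length_nil, if_true, ← pvGetEq]
        cases hga : pvDayNumB a with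
        | none => simp [PySem.Set.empty]
        | some s =>
          cases hgb : pvDayNumB b with
          | none => simp [PySem.Set.empty]
          | some e =>
            dsimp only
            simp only [Option.isNone_some, Bool.or_self, Bool.false_eq_true, if_false,
                       Option.getD_some]
            obtain ⟨hs0, hs6⟩ := pvDayNumBRange a s hga
            obtain ⟨he0, he6⟩ := pvDayNumBRange b e hgb
            simp only [PySem.Int.mod_eq_emod_of_pos (by norm_num : (0:Int) < 7)]
            by_cases hle : s ≤ e
            · simp only [hle, if_true]
              rw [Bool.eq_iff_iff, PySem.Set.contains_iff]
              simp only [pvFoldAddMem, PySem.Set.empty, List.not_mem_nil, false_or,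
                         PySem.List.mem_pyRange_one, Bool.and_eq_true, decide_eq_true_iff]
              omega
            · simp only [hle, if_false]
              rw [Bool.eq_iff_iff, PySem.Set.contains_iff]
              simp only [pvFoldAddMem, PySem.Set.empty, List.not_mem_nil, false_or,
                         PySem.List.mem_pyRange_one, Bool.and_eq_true, decide_eq_true_iff]
              omega
      · simp [PySem.Set.empty]
  | false =>
    simp only [Bool.false_eq_true, if_false]
    simp only [PySem.Set.empty]
    have hcond : (fun c => decide ('1' ≤ c) && decide (c ≤ '7')) =
        (fun c => pvSeven.contains c) := funext pvDigitCond
    rw [hcond]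
    obtain ⟨hflag, hmem⟩ := pvDigitLoop ds.toList ([] : PySem.Set Int) false
    simp only [List.not_mem_nil, false_or] at hmem
    rw [hflag, Bool.false_or]
    cases hany : ds.toList.any (fun c => pvSeven.contains c) with
    | true =>
      simp only [if_true]
      by_cases hw : 0 ≤ w ∧ w ≤ 6
      · obtain ⟨c0, hc0, hwv, hstr⟩ := pvCharOfVal w hw.1 hw.2
        rw [hstr, Bool.eq_iff_iff, PySem.Set.contains_iff, hmem w]
        simp only [Bool.and_eq_true, decide_eq_true_iff, PySem.Str.isIn_iff_infix,
                   String.toList_ofList]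
        rw [pvSingletonInfix]
        constructor
        · rintro ⟨c, hcin, hcs, rfl⟩
          refine ⟨⟨?_, ?_⟩, ?_⟩
          · have := pvSevenBounds c hcs; omega
          · have := pvSevenBounds c hcs; omega
          · exact (pvSevenEqOfVal c c0 hcs hc0 hwv) ▸ hcin
        · rintro ⟨-, hcin⟩
          exact ⟨c0, hcin, hc0, hwv⟩
      · have hfalse : decide (0 ≤ w ∧ w ≤ 6) = false := by
          simp only [decide_eq_false_iff_not]; omega
        rw [hfalse, Bool.false_and, Bool.eq_iff_iff, PySem.Set.contains_iff, hmem w]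
        simp only [Bool.false_eq_true, iff_false]
        rintro ⟨c, -, hcs, rfl⟩
        have := pvSevenBounds c hcs
        omega
    | false =>
      simp only [Bool.false_eq_true, if_false]
      have hempty : ∀ x : Int,
          x ∉ (ds.toList.foldl pvDigitStep (([] : PySem.Set Int), false)).1 := by
        intro x hx
        rw [hmem x] at hx
        obtain ⟨c, hcin, hcs, -⟩ := hx
        have : ds.toList.any (fun c => pvSeven.contains c) = true :=
          List.any_eq_true.mpr ⟨c, hcin, by simp [List.contains_eq_mem, hcs]⟩
        rw [hany] at this; cases this
      rw [pvGetEq]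
      cases hgs : pvDayMap.get? (PySem.Str.strip ds) with
      | none =>
        dsimp only
        rw [show ((none : Option Int) == some w) = false from rfl, Bool.eq_iff_iff,
            PySem.Set.contains_iff]
        simp only [Bool.false_eq_true, iff_false]
        exact hempty w
      | some d =>
        dsimp only
        rw [Bool.eq_iff_iff, PySem.Set.contains_iff]
        simp only [PySem.Set.mem_add, beq_iff_eq, Option.some.injEq]
        constructor
        · rintro (h | rfl)
          · exact absurd h (hempty w)
          · rfl
        · rintro rfl; exact Or.inr rfl
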